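-- pv_equiv track=rewrite | github.com/xander27481/informatica5 | toets 3/Dronken woorden.py | dronken_voeren
-- ===== SOURCE A (Python) =====
-- def dronken_voeren(woord):
--     nieuw = ''
--     # Je hebt een BOB: de eerste letter van het woord drinkt niet en neem je gewoon over.
--     nieuw += woord[0]
--     for i in range(1, len(woord)):
--         if i % 2 == 0:
--             nieuw += woord[i].upper()
--         elif nieuw[-1] in 'AEIOU':
--             nieuw += woord[i].upper()
--         else:
--             nieuw += woord[i].lower()
--     return nieuw
-- ===== SOURCE B (Python) =====
-- def dronken_voeren(woord):
--     # staged passes: baseline casing by parity, restore the BOB, then a vowel fix-up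
--     # pass over the odd positions (their even predecessors are already final).
--     chars = [c.upper() if i % 2 == 0 else c.lower() for i, c in enumerate(woord)]
--     chars[0] = woord[0]
--     for i in range(1, len(woord), 2):
--         if chars[i - 1] in 'AEIOU':
--             chars[i] = woord[i].upper()
--     return ''.join(chars)
-- ===== Notes on version B (the rewrite author's own statement) =====
-- stated objective: alternative
-- what changed: A is a single stateful pass that appends to an output string and reads its last character back (nieuw[-1]) at each odd index; B is staged passes over a character array: a parity-casing comprehension, restoring the first character, then a step-2 fix-up loop that re-uppercases odd positions whose (already-final) predecessor is an uppercase vowel, joined once at the end.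
import Mathlib
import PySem

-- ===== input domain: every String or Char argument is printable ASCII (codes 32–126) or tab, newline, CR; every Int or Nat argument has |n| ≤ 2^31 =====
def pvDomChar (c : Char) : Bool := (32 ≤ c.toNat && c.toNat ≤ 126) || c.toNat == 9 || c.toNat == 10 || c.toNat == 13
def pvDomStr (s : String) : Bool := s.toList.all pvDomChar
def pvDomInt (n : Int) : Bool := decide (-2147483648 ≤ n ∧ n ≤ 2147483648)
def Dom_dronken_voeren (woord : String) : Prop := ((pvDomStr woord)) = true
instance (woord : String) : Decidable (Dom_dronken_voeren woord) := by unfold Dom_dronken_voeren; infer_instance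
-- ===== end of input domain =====

-- B replaces A's single stateful pass (which reads the OUTPUT buffer's last char back at each
-- odd index) by staged passes over a character array: baseline casing by parity, restore the
-- first char, then a step-2 vowel fix-up pass over the odd positions; objective: alternative.

-- ===== PORT A =====
-- A's loop body (i ranges over 1..len-1, so i ≥ 0 and Lean's Int % agrees with Python's %):
-- even index → upper; else last char of the output buffer in 'AEIOU' → upper; else lower
-- (a one-char 'x in "AEIOU"' membership test is ported as char-list membership; exact)
def pvStepA (cs : List Char) (acc : List Char) (i : Int) : List Char :=
  if i % 2 == 0 then acc ++ [PySem.Chars.upperChar (PySem.List.pyGetD cs i ' ')]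
  else if PySem.List.pyGetD acc (-1) ' ' ∈ ['A', 'E', 'I', 'O', 'U'] then
    acc ++ [PySem.Chars.upperChar (PySem.List.pyGetD cs i ' ')]
  else acc ++ [PySem.Chars.lowerChar (PySem.List.pyGetD cs i ' ')]

def dronken_voeren (woord : String) : String :=
  let cs := woord.toList
  -- 'nieuw += woord[0]' ; woord[0] raises on "" (excluded by Pre_), here elim to []
  let nieuw : List Char := (PySem.List.pyGet? cs 0).elim [] (fun c => [c])
  String.ofList ((PySem.List.pyRange 1 (cs.length : Int) 1).foldl (pvStepA cs) nieuw)

-- ===== PORT B =====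
-- pass 1: baseline casing by index parity (the list comprehension over enumerate)
def pvBase (p : Int × Char) : Char :=
  if p.1 % 2 == 0 then PySem.Chars.upperChar p.2 else PySem.Chars.lowerChar p.2

-- pass 2 body: at odd index i, if chars[i-1] is an uppercase vowel, chars[i] = woord[i].upper()
def pvStepB (cs : List Char) (acc : List Char) (i : Int) : List Char :=
  if PySem.List.pyGetD acc (i - 1) ' ' ∈ ['A', 'E', 'I', 'O', 'U'] then
    PySem.List.pySetD acc i (PySem.Chars.upperChar (PySem.List.pyGetD cs i ' '))
  else acc

def dronken_voeren_alt (woord : String) : String :=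
  let cs := woord.toList
  let chars0 := (PySem.List.enumerate cs 0).map pvBase
  -- 'chars[0] = woord[0]' ; woord[0] raises on "" (excluded by Pre_), here elim to no-op
  let chars1 := (PySem.List.pyGet? cs 0).elim chars0 (fun c => PySem.List.pySetD chars0 0 c)
  let chars2 := (PySem.List.pyRange 1 (cs.length : Int) 2).foldl (pvStepB cs) chars1
  String.ofList chars2

-- ===== PRECONDITION & SPEC =====
-- Pre_ excludes only the empty string, on which both A and B raise IndexError.
def Pre_dronken_voeren (woord : String) : Prop := woord ≠ ""
instance (woord : String) : Decidable (Pre_dronken_voeren woord) := by unfold Pre_dronken_voeren; infer_instance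
def pvWitness_dronken_voeren : String := "Abcdef"

def Spec_dronken_voeren (woord : String) (out : String) : Prop := out = dronken_voeren_alt woord
instance (woord : String) (out : String) : Decidable (Spec_dronken_voeren woord out) := by unfold Spec_dronken_voeren; infer_instance

-- ===== CLAIM (what is proved, stated in full; the proofs are below) =====
def Claim_equal_dronken_voeren : Prop := ∀ (woord : String), Dom_dronken_voeren woord → Pre_dronken_voeren woord → Spec_dronken_voeren woord (dronken_voeren woord)

-- ===== LEMMAS AND PROOFS =====

-- the common specification both ports are reduced to: a stateless per-index decision
def pvKies (cs : List Char) (i : Int) : Char :=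
  let c := PySem.List.pyGetD cs i ' '
  if i % 2 == 0 then PySem.Chars.upperChar c
  else
    let prev := if i == 1 then PySem.List.pyGetD cs 0 ' '
                else PySem.Chars.upperChar (PySem.List.pyGetD cs (i - 1) ' ')
    if prev ∈ ['A', 'E', 'I', 'O', 'U'] then PySem.Chars.upperChar c
    else PySem.Chars.lowerChar c

-- A-side loop invariant: A's accumulator after indices 1..k-1 is exactly pvKies's prefix
lemma pv_loop_eq (c : Char) (rest : List Char) :
    ∀ k : Nat, 1 ≤ k →
    (PySem.List.pyRange 1 (k : Int) 1).foldl (pvStepA (c :: rest)) [c]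
      = c :: (PySem.List.pyRange 1 (k : Int) 1).map (pvKies (c :: rest)) := by
  intro k hk
  induction k with
  | zero => omega
  | succ k ih =>
    rcases Nat.lt_or_ge k 1 with hk1 | hk1
    · interval_cases k
      simp [PySem.List.pyRange_one_eq_nil]
    · have hr : PySem.List.pyRange 1 ((k + 1 : Nat) : Int) 1
          = PySem.List.pyRange 1 (k : Int) 1 ++ [(k : Int)] := by
        have h := PySem.List.pyRange_one_succ_right (a := 1) (b := (k : Int)) (by exact_mod_cast hk1)
        push_cast
        exact h
      rw [hr, List.foldl_append, List.map_append, ih hk1]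
      show pvStepA (c :: rest) (c :: List.map (pvKies (c :: rest)) (PySem.List.pyRange 1 (k : Int) 1)) (k : Int) = _
      by_cases hpar : (k : Int) % 2 = 0
      · simp [pvStepA, pvKies, hpar]
      · rcases Nat.lt_or_ge k 2 with hk2 | hk2
        · -- k = 1 : A reads the buffer's only char, woord[0]
          interval_cases k
          have hl : PySem.List.pyGetD [c] (-1) ' ' = c := by
            rw [PySem.List.pyGetD_neg_one (xs := [c]) (d := ' ') (by simp)]
            simp
          simp [pvStepA, pvKies, PySem.List.pyRange_one_eq_nil, hl]
          split_ifs <;> simp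
        · -- k ≥ 3 odd : the buffer's last char is the char appended at even index k-1
          obtain ⟨m, rfl⟩ : ∃ m, k = m + 1 := ⟨k - 1, by omega⟩
          have hm : PySem.List.pyRange 1 ((m + 1 : Nat) : Int) 1
              = PySem.List.pyRange 1 (m : Int) 1 ++ [(m : Int)] := by
            have h := PySem.List.pyRange_one_succ_right (a := 1) (b := (m : Int)) (by exact_mod_cast (by omega : 1 ≤ m))
            push_cast
            exact h
          have hmpar : ((m : Int)) % 2 = 0 := by omega
          have hlast : PySem.List.pyGetD
              (c :: List.map (pvKies (c :: rest)) (PySem.List.pyRange 1 ((m + 1 : Nat) : Int) 1)) (-1) ' '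
              = pvKies (c :: rest) (m : Int) := by
            rw [hm, List.map_append]
            exact PySem.List.pyGetD_neg_one_append_singleton
              (xs := c :: List.map (pvKies (c :: rest)) (PySem.List.pyRange 1 (m : Int) 1)) _ _
          have hne1 : ((m : Int) + 1) ≠ 1 := by omega
          have heq : ((m + 1 : Nat) : Int) = (m : Int) + 1 := by push_cast; ring
          rw [heq] at hlast ⊢
          simp only [pvStepA, pvKies, hlast, hmpar, beq_iff_eq]
          have hm0 : m ≠ 0 := by omega
          have hodd : ¬ (2 ∣ ((m : Int) + 1)) := by omega
          simp [pvKies, hodd, hm0]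
          split_ifs <;> simp

-- B-side pass-1 characterization
lemma pv_chars0_getElem (cs : List Char) (j : Nat) :
    ((PySem.List.enumerate cs 0).map pvBase)[j]? =
      cs[j]?.map (fun x => if j % 2 = 0 then PySem.Chars.upperChar x
                           else PySem.Chars.lowerChar x) := by
  rw [List.getElem?_map, PySem.List.getElem?_enumerate]
  cases hx : cs[j]? with
  | none => rfl
  | some x =>
    by_cases hp : j % 2 = 0
    · have h2 : ((0 : Int) + (j : Nat)) % 2 = 0 := by omega
      simp [pvBase, hp]
      intro hco
      exfalso
      omega
    · have h2 : ¬ (((0 : Int) + (j : Nat)) % 2 = 0) := by omega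
      simp [pvBase, hp]
      intro hco
      exfalso
      omega

-- B-side fix-up pass: elementwise effect of the step-2 fold; the read at i-1 (an even
-- position) is never written (only odd positions are), so the condition can be stated
-- against the initial array
lemma pv_fold_getElem (cs : List Char) (L : List Int) :
    ∀ (acc : List Char),
    (∀ i ∈ L, 0 < i ∧ i < (acc.length : Int) ∧ i % 2 = 1) →
    ∀ j : Nat,
    (L.foldl (pvStepB cs) acc)[j]? =
      if (j : Int) ∈ L ∧ acc.getD (j - 1) ' ' ∈ ['A', 'E', 'I', 'O', 'U']
      then some (PySem.Chars.upperChar (cs.getD j ' '))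
      else acc[j]? := by
  induction L with
  | nil => intro acc _ j; simp
  | cons i L ih =>
    intro acc hL j
    obtain ⟨hi0, hilen, hiodd⟩ := hL i (by simp)
    have hik : i = ((i.toNat : Nat) : Int) := (Int.toNat_of_nonneg hi0.le).symm
    set k := i.toNat with hkdef
    have hk1 : 1 ≤ k := by omega
    have hklen : k < acc.length := by omega
    have hkodd : k % 2 = 1 := by omega
    have hstep : pvStepB cs acc i =
        if acc.getD (k - 1) ' ' ∈ ['A', 'E', 'I', 'O', 'U']
        then acc.set k (PySem.Chars.upperChar (cs.getD k ' '))
        else acc := by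
      unfold pvStepB
      rw [hik]
      have h1 : ((k : Nat) : Int) - 1 = ((k - 1 : Nat) : Int) := by omega
      rw [h1, PySem.List.pyGetD_natCast, PySem.List.pyGetD_natCast, PySem.List.pySetD_natCast]
    rw [List.foldl_cons, hstep]
    by_cases hcond : acc.getD (k - 1) ' ' ∈ ['A', 'E', 'I', 'O', 'U']
    · rw [if_pos hcond]
      set acc' := acc.set k (PySem.Chars.upperChar (cs.getD k ' ')) with hacc'
      have hlen' : acc'.length = acc.length := by simp [hacc']
      have hbounds : ∀ i' ∈ L, 0 < i' ∧ i' < (acc'.length : Int) ∧ i' % 2 = 1 := by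
        intro i' hi'
        have := hL i' (by simp [hi'])
        omega
      rw [ih acc' hbounds j]
      by_cases hjL : (j : Int) ∈ L
      · obtain ⟨hj0, hjlen, hjodd⟩ := hL (j : Int) (by simp [hjL])
        have hjodd' : j % 2 = 1 := by omega
        have hne : k ≠ j - 1 := by omega
        have hprev : acc'.getD (j - 1) ' ' = acc.getD (j - 1) ' ' := by
          rw [List.getD_eq_getElem?_getD, List.getD_eq_getElem?_getD, hacc',
            List.getElem?_set_ne hne]
        rw [hprev]
        by_cases hv : acc.getD (j - 1) ' ' ∈ ['A', 'E', 'I', 'O', 'U']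
        · rw [if_pos ⟨hjL, hv⟩, if_pos ⟨List.mem_cons_of_mem _ hjL, hv⟩]
        · rw [if_neg (fun h => hv h.2), if_neg (fun h => hv h.2)]
          by_cases hjk : j = k
          · subst hjk; exact absurd hcond hv
          · rw [hacc', List.getElem?_set_ne (by omega)]
      · by_cases hjk : j = k
        · subst hjk
          have hmem : ((k : Nat) : Int) ∈ i :: L := by rw [← hik]; simp
          rw [if_neg (by simp [hjL]), if_pos ⟨hmem, hcond⟩, hacc',
            List.getElem?_set_self hklen]
        · rw [if_neg (by simp [hjL]), hacc', List.getElem?_set_ne (by omega)]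
          by_cases hji : (j : Int) ∈ i :: L
          · have : (j : Int) = i ∨ (j : Int) ∈ L := by simpa using hji
            rcases this with h | h
            · exfalso; apply hjk; omega
            · exact absurd h hjL
          · rw [if_neg (by intro h; exact hji h.1)]
    · rw [if_neg hcond,
        ih acc (fun i' hi' => hL i' (List.mem_cons_of_mem _ hi')) j]
      by_cases hjL : (j : Int) ∈ L
      · simp [hjL]
      · by_cases hjk : j = k
        · subst hjk
          rw [if_neg (by simp [hjL]), if_neg (by rintro ⟨-, hv⟩; exact hcond hv)]
        · have : ¬ ((j : Int) ∈ i :: L) := by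
            simp only [List.mem_cons, not_or]
            exact ⟨by omega, hjL⟩
          rw [if_neg (by simp [hjL]), if_neg (by rintro ⟨h, -⟩; exact this h)]

-- B's staged passes produce exactly pvKies's prefix
lemma pv_B_eq (c : Char) (rest : List Char) :
    (PySem.List.pyRange 1 (((c :: rest).length : Nat) : Int) 2).foldl (pvStepB (c :: rest))
      (PySem.List.pySetD ((PySem.List.enumerate (c :: rest) 0).map pvBase) 0 c)
      = c :: (PySem.List.pyRange 1 (((c :: rest).length : Nat) : Int) 1).map (pvKies (c :: rest)) := by
  set cs := c :: rest with hcs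
  set n := cs.length with hn
  have hn1 : 1 ≤ n := by rw [hn, hcs]; simp
  set chars0 := (PySem.List.enumerate cs 0).map pvBase with hchars0
  have hlen0 : chars0.length = n := by simp [hchars0, hn]
  have hset : PySem.List.pySetD chars0 0 c = chars0.set 0 c := by
    rw [PySem.List.pySetD_of_nonneg _ _ (by omega)]; rfl
  set chars1 := chars0.set 0 c with hchars1
  have hlen1 : chars1.length = n := by simp [hchars1, hlen0]
  have h1get : ∀ j : Nat, chars1[j]? =
      if j = 0 then some c else chars0[j]? := by
    intro j
    by_cases hj : j = 0
    · subst hj; rw [hchars1, List.getElem?_set_self (by omega), if_pos rfl]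
    · rw [hchars1, List.getElem?_set_ne (by omega), if_neg hj]
  rw [hset]
  apply List.ext_getElem?
  intro j
  have hmem : ((j : Int) ∈ PySem.List.pyRange 1 (n : Int) 2) ↔
      (1 ≤ j ∧ j < n ∧ j % 2 = 1) := by
    rw [PySem.List.mem_pyRange_iff_of_pos (by omega)]
    constructor
    · rintro ⟨h1, h2, h3⟩
      refine ⟨by omega, by omega, ?_⟩
      omega
    · rintro ⟨h1, h2, h3⟩
      refine ⟨by omega, by omega, ?_⟩
      omega
  rw [pv_fold_getElem cs _ chars1
    (by
      intro i hi
      rw [PySem.List.mem_pyRange_iff_of_pos (by omega)] at hi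
      refine ⟨by omega, by omega, by omega⟩) j]
  -- right-hand side
  rcases Nat.eq_zero_or_pos j with hj0 | hjpos
  · subst hj0
    rw [if_neg (by rintro ⟨h, -⟩; rw [hmem] at h; omega)]
    rw [h1get 0, if_pos rfl]
    simp
  · obtain ⟨kk, rfl⟩ : ∃ kk, j = kk + 1 := ⟨j - 1, by omega⟩
    have hT : (c :: (PySem.List.pyRange 1 (n : Int) 1).map (pvKies cs))[kk + 1]? =
        if kk + 1 < n then some (pvKies cs ((kk : Int) + 1)) else none := by
      show ((PySem.List.pyRange 1 (n : Int) 1).map (pvKies cs))[kk]? = _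
      rw [List.getElem?_map, PySem.List.getElem?_pyRange_one]
      by_cases h : kk + 1 < n
      · rw [if_pos (by omega), if_pos h]
        simp [add_comm]
      · rw [if_neg (by omega), if_neg h]
        rfl
    rw [hT]
    by_cases hjn : kk + 1 < n
    · rw [if_pos hjn]
      have hcI : PySem.List.pyGetD cs ((kk : Int) + 1) ' ' = cs.getD (kk + 1) ' ' := by
        have hc : (kk : Int) + 1 = ((kk + 1 : Nat) : Int) := by omega
        rw [hc, PySem.List.pyGetD_natCast]
      have hget0 : chars0[kk + 1]? =
          some (if (kk + 1) % 2 = 0 then PySem.Chars.upperChar (cs.getD (kk + 1) ' ')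
                else PySem.Chars.lowerChar (cs.getD (kk + 1) ' ')) := by
        rw [pv_chars0_getElem]
        have hsome : cs[kk + 1]? = some cs[kk + 1] := List.getElem?_eq_getElem (by omega)
        rw [hsome]
        have : cs.getD (kk + 1) ' ' = cs[kk + 1] := List.getD_eq_getElem cs ' ' (by omega)
        rw [this]
        split_ifs <;> rfl
      by_cases hpar : (kk + 1) % 2 = 0
      · -- even index: not in the fix-up range; pvKies takes the upper branch
        rw [if_neg (by rintro ⟨h, -⟩; rw [hmem] at h; omega)]
        rw [h1get, if_neg (by omega), hget0, if_pos hpar]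
        rw [pvKies]
        rw [if_pos (show (((kk : Int) + 1) % 2 == 0) = true by
          simp only [beq_iff_eq]; omega)]
        rw [hcI]
      · -- odd index: in the fix-up range; the read char equals pvKies's prev
        have hmemj : (((kk + 1 : Nat) : Nat) : Int) ∈ PySem.List.pyRange 1 (n : Int) 2 := by
          rw [hmem]; omega
        have hprev : chars1.getD (kk + 1 - 1) ' ' =
            (if (((kk : Int) + 1) == 1) = true then PySem.List.pyGetD cs 0 ' '
             else PySem.Chars.upperChar (PySem.List.pyGetD cs ((kk : Int) + 1 - 1) ' ')) := by
          rcases Nat.eq_zero_or_pos kk with hkk0 | hkkpos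
          · subst hkk0
            rw [List.getD_eq_getElem?_getD]
            simp only [Nat.cast_zero, zero_add]
            rw [h1get 0, if_pos rfl, if_pos (by decide)]
            rw [hcs, PySem.List.pyGetD_zero_cons]
            rfl
          · rw [if_neg (show ¬ ((((kk : Int) + 1) == 1) = true) by
              simp only [beq_iff_eq]; omega)]
            rw [List.getD_eq_getElem?_getD]
            simp only [Nat.add_sub_cancel]
            rw [h1get kk, if_neg (by omega), pv_chars0_getElem]
            have hsome : cs[kk]? = some cs[kk] := List.getElem?_eq_getElem (by omega)
            rw [hsome]
            have hkpar : kk % 2 = 0 := by omega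
            have hc : (kk : Int) + 1 - 1 = ((kk : Nat) : Int) := by omega
            rw [hc, PySem.List.pyGetD_natCast]
            have : cs.getD kk ' ' = cs[kk] := List.getD_eq_getElem cs ' ' (by omega)
            rw [this]
            simp [hkpar]
        rw [pvKies]
        rw [if_neg (show ¬ ((((kk : Int) + 1) % 2 == 0) = true) by
          simp only [beq_iff_eq]; omega)]
        by_cases hv : chars1.getD (kk + 1 - 1) ' ' ∈ ['A', 'E', 'I', 'O', 'U']
        · rw [if_pos ⟨hmemj, hv⟩]
          rw [hprev] at hv
          rw [if_pos hv, hcI]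
        · rw [if_neg (by rintro ⟨-, h⟩; exact hv h)]
          rw [hprev] at hv
          rw [if_neg hv, h1get, if_neg (by omega), hget0, if_neg hpar, hcI]
    · -- j ≥ n: both sides are none
      rw [if_neg hjn]
      rw [if_neg (by rintro ⟨h, -⟩; rw [hmem] at h; omega)]
      rw [h1get, if_neg (by omega), pv_chars0_getElem]
      have : cs[kk + 1]? = none := List.getElem?_eq_none (by omega)
      rw [this]
      rfl

-- ===== VERDICT (by name: the statement is the Claim_ definition above) =====
theorem dronken_voeren_spec : Claim_equal_dronken_voeren := by
  intro woord _ hpre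
  unfold Spec_dronken_voeren dronken_voeren dronken_voeren_alt
  cases h : woord.toList with
  | nil => exact absurd (String.toList_eq_nil_iff.mp h) hpre
  | cons c rest =>
    have h0 : PySem.List.pyGet? (c :: rest) 0 = some c := by
      simp [PySem.List.pyGet?, PySem.List.pyIdx?]
    simp only [h0, Option.elim]
    rw [pv_loop_eq c rest (c :: rest).length (by simp)]
    rw [pv_B_eq c rest]
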